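-- pv_equiv track=rewrite | github.com/Sabdikay/Connect4 | Connect4(AI player).py | evaluateArray
-- ===== SOURCE A (Python) =====
-- def evaluateArray(array, piece):
--     score = 0
--     for i in range(len(array) - 3):
--         window = array[i:i + 4]
--         if window.count(piece) == 4:
--             score += 100
--         elif window.count(piece) == 3 and window.count(" ") == 1:
--             score += 5
--         elif window.count(piece) == 2 and window.count(" ") == 2:
--             score += 2
--     return score
-- ===== SOURCE B (Python) =====
-- def evaluateArray(array, piece):
--     n = len(array)
--     pp = [0] * (n + 1)  # pp[j] = count of `piece` in array[:j]
--     ps = [0] * (n + 1)  # ps[j] = count of " "  in array[:j]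
--     for j in range(n):
--         pp[j + 1] = pp[j] + (1 if array[j] == piece else 0)
--         ps[j + 1] = ps[j] + (1 if array[j] == " " else 0)
--     score = 0
--     for i in range(n - 3):
--         p = pp[i + 4] - pp[i]
--         s = ps[i + 4] - ps[i]
--         if p == 4:
--             score += 100
--         elif p == 3 and s == 1:
--             score += 5
--         elif p == 2 and s == 2:
--             score += 2
--     return score
-- ===== Notes on version B (the rewrite author's own statement) =====
-- stated objective: alternative
-- what changed: B precomputes prefix-count tables for `piece` and for " " once, then scores each window from two table differences instead of slicing and re-counting each 4-cell window.
import Mathlib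
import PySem

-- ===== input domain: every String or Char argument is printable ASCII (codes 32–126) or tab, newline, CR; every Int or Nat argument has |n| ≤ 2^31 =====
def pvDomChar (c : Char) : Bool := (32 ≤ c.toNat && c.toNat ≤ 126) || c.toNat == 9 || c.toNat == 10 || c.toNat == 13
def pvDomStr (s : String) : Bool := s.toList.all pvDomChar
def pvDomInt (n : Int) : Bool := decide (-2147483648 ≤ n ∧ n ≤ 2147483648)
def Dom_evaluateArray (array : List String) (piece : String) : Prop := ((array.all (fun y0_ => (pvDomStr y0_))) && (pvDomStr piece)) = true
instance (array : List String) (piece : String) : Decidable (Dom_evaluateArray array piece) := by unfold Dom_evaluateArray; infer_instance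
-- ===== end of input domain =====

-- B replaces per-window slice-and-recount with two prefix-count tables read by difference (alternative decomposition, same cost class).

-- ===== PORT A =====
def evaluateArray (array : List String) (piece : String) : Int :=
  (PySem.List.pyRange 0 ((array.length : Int) - 3) 1).foldl
    (fun score i =>
      let window := PySem.List.slice array (some i) (some (i + 4))
      if PySem.List.count window piece = 4 then score + 100
      else if PySem.List.count window piece = 3 ∧ PySem.List.count window " " = 1 then score + 5
      else if PySem.List.count window piece = 2 ∧ PySem.List.count window " " = 2 then score + 2
      else score) 0

-- ===== PORT B =====
-- the `for j in range(n)` filling of pp/ps is the left scan of the 0/1 indicator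
def pvPrefix (array : List String) (key : String) : List Int :=
  array.scanl (fun acc a => acc + (if a == key then (1 : Int) else 0)) 0

def evaluateArray_alt (array : List String) (piece : String) : Int :=
  let pp := pvPrefix array piece
  let ps := pvPrefix array " "
  (List.range (array.length - 3)).foldl
    (fun score i =>
      let p := pp.getD (i + 4) 0 - pp.getD i 0
      let s := ps.getD (i + 4) 0 - ps.getD i 0
      if p = 4 then score + 100
      else if p = 3 ∧ s = 1 then score + 5
      else if p = 2 ∧ s = 2 then score + 2
      else score) 0

-- ===== PRECONDITION & SPEC =====
def Spec_evaluateArray (array : List String) (piece : String) (out : Int) : Prop := out = evaluateArray_alt array piece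
instance (array : List String) (piece : String) (out : Int) : Decidable (Spec_evaluateArray array piece out) := by unfold Spec_evaluateArray; infer_instance

-- ===== CLAIM (what is proved, stated in full; the proofs are below) =====
def Claim_equal_evaluateArray : Prop := ∀ (array : List String) (piece : String), Dom_evaluateArray array piece → Spec_evaluateArray array piece (evaluateArray array piece)

-- ===== LEMMAS AND PROOFS =====

-- prefix table reads back the count of `key` in the first j cells
theorem pvPrefix_getD (key : String) (l : List String) (c : Int) (j : Nat) (hj : j ≤ l.length) :
    (List.scanl (fun acc a => acc + (if a == key then (1 : Int) else 0)) c l).getD j 0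
      = c + ((l.take j).count key : Int) := by
  induction l generalizing c j with
  | nil =>
    obtain rfl : j = 0 := Nat.le_zero.mp hj
    simp [List.scanl]
  | cons a tl ih =>
    cases j with
    | zero => simp [List.scanl]
    | succ j =>
      rw [List.scanl_cons, List.getD_cons_succ, ih _ _ (by simpa using hj)]
      simp [List.count_cons]
      split_ifs <;> ring

theorem evaluateArray_spec : Claim_equal_evaluateArray := by
  intro array piece _
  unfold Spec_evaluateArray evaluateArray evaluateArray_alt pvPrefix
  rw [PySem.List.pyRange_one]
  simp only [List.foldl_map, zero_add]
  rw [show ((array.length : Int) - 3 - 0).toNat = array.length - 3 by omega]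
  apply PySem.List.foldl_congr_mem
  intro acc i hi
  have hi' : i < array.length - 3 := List.mem_range.mp hi
  have h4 : i + 4 ≤ array.length := by omega
  have hslice : PySem.List.slice array (some (i : Int)) (some ((i : Int) + 4))
      = (array.drop i).take 4 := by
    rw [show ((i : Int) + 4) = ((i + 4 : Nat) : Int) by push_cast; ring, PySem.List.slice_natCast]
    congr 1
    omega
  have hkey : ∀ key : String,
      (List.scanl (fun acc a => acc + if (a == key) = true then (1:Int) else 0) 0 array).getD (i + 4) 0
        - (List.scanl (fun acc a => acc + if (a == key) = true then (1:Int) else 0) 0 array).getD i 0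
      = (List.count key ((array.drop i).take 4) : Int) := by
    intro key
    rw [pvPrefix_getD key array 0 (i + 4) h4, pvPrefix_getD key array 0 i (by omega),
      List.take_add, List.count_append]
    push_cast
    ring
  rw [hslice, hkey piece, hkey " "]
  simp [PySem.List.count_eq]
  norm_cast
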